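-- pv_equiv track=rewrite | github.com/ctsit/optimus | optimus/project_specific/shared.py | derive_form_completed
-- ===== SOURCE A (Python) =====
-- def derive_form_completed(config, data):
--     """
--     From the config takes the form name and sets the form_complete
--     value to 2. This is in shared because every form has this field
--     automatically
--     """
--     forms = config['forms']
--     form_names = [form['form_name'] for form in forms]
--     for record in data:
--         for name in form_names:
--             if record.get(name):
--                 record[name][name + '_complete'] = '2'
--     return data
-- ===== SOURCE B (Python) =====
-- def derive_form_completed(config, data):
--     form_set = set(form['form_name'] for form in config['forms'])
--     for record in data:
--         for name in list(record):
--             if name in form_set and record[name]: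
--                 record[name][name + '_complete'] = '2'
--     return data
-- ===== Notes on version B (the rewrite author's own statement) =====
-- stated objective: alternative
-- what changed: Instead of rescanning the full form-name list for every record, B builds a set of form names once and iterates each record's own keys, testing membership in that set.
import Mathlib
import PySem

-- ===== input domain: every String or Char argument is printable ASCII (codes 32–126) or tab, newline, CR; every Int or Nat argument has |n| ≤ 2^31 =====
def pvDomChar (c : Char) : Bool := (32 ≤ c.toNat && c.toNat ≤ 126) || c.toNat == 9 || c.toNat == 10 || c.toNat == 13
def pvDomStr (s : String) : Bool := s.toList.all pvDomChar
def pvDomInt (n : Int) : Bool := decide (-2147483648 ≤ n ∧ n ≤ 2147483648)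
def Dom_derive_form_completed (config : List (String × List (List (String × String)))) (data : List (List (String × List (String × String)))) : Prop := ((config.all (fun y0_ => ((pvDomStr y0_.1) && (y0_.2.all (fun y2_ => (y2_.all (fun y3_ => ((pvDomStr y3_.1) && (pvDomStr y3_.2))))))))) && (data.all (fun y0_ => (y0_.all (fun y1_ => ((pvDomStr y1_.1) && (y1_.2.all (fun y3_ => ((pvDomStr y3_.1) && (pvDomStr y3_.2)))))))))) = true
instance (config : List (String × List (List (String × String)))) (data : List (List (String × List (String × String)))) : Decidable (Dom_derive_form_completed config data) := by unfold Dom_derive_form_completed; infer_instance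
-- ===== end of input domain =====

-- B iterates each record's own keys against a set of form names (instead of rescanning the
-- full form-name list per record); return value proved equal, both mutate `data` in place in Python.

-- ===== PORT A =====
-- record[name][name + '_complete'] = '2'  (the stored inner dict after the assignment)
def pvUpd (name : String) (d : List (String × String)) : List (String × String) :=
  ((PySem.Dict.mk d).insert (name ++ "_complete") "2").items

-- one iteration of A's inner loop body: `if record.get(name): record[name][name+'_complete']='2'`
def pvStepA (r : List (String × List (String × String))) (name : String) :
    List (String × List (String × String)) :=
  match (PySem.Dict.mk r).get? name with
  | some d => if d = [] then r else ((PySem.Dict.mk r).insert name (pvUpd name d)).items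
  | none => r

def derive_form_completed (config : List (String × List (List (String × String)))) (data : List (List (String × List (String × String)))) : List (List (String × List (String × String))) :=
  -- config['forms'] / form['form_name']: getD is exact under Pre_ (the keys are present there)
  let forms := (PySem.Dict.mk config).getD "forms" []
  let form_names := forms.map (fun form => (PySem.Dict.mk form).getD "form_name" "")
  data.map (fun record => form_names.foldl pvStepA record)

-- ===== PORT B =====
def derive_form_completed_alt (config : List (String × List (List (String × String)))) (data : List (List (String × List (String × String)))) : List (List (String × List (String × String))) :=
  let formSet : PySem.Set String :=
    PySem.Set.ofList (((PySem.Dict.mk config).getD "forms" []).map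
      (fun form => (PySem.Dict.mk form).getD "form_name" ""))
  data.map (fun record => record.map (fun e =>
    if formSet.contains e.1 ∧ e.2 ≠ [] then (e.1, pvUpd e.1 e.2) else e))

-- ===== PRECONDITION & SPEC =====
-- A raises KeyError when config lacks 'forms' or some form lacks 'form_name'; those inputs are
-- excluded. Pre_ also requires each record's keys to be distinct, which every Python dict
-- satisfies automatically (an assoc list with duplicate keys represents no Python input).
def Pre_derive_form_completed (config : List (String × List (List (String × String)))) (data : List (List (String × List (String × String)))) : Prop :=
  (PySem.Dict.mk config).contains "forms" = true ∧
  (∀ form ∈ (PySem.Dict.mk config).getD "forms" [], (PySem.Dict.mk form).contains "form_name" = true) ∧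
  ∀ record ∈ data, (record.map Prod.fst).Nodup
instance (config : List (String × List (List (String × String)))) (data : List (List (String × List (String × String)))) : Decidable (Pre_derive_form_completed config data) := by unfold Pre_derive_form_completed; infer_instance

def pvWitness_derive_form_completed : (List (String × List (List (String × String)))) × (List (List (String × List (String × String)))) :=
  ([("forms", [[("form_name", "f")], [("form_name", "g")]])],
   [[("f", [("x", "y")]), ("g", []), ("h", [("z", "w")])]])

def Spec_derive_form_completed (config : List (String × List (List (String × String)))) (data : List (List (String × List (String × String)))) (out : List (List (String × List (String × String)))) : Prop := out = derive_form_completed_alt config data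
instance (config : List (String × List (List (String × String)))) (data : List (List (String × List (String × String)))) (out : List (List (String × List (String × String)))) : Decidable (Spec_derive_form_completed config data out) := by unfold Spec_derive_form_completed; infer_instance

-- ===== CLAIM (what is proved, stated in full; the proofs are below) =====
def Claim_equal_derive_form_completed : Prop := ∀ (config : List (String × List (List (String × String)))) (data : List (List (String × List (String × String)))), Dom_derive_form_completed config data → Pre_derive_form_completed config data → Spec_derive_form_completed config data (derive_form_completed config data)

-- ===== LEMMAS AND PROOFS =====

-- the per-entry effect of one pass of A's inner body with key `name`
def pvH (name : String) (e : String × List (String × String)) : String × List (String × String) :=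
  if e.1 = name ∧ e.2 ≠ [] then (e.1, pvUpd e.1 e.2) else e

theorem pvUpd_ne_nil (name : String) (d : List (String × String)) : pvUpd name d ≠ [] := by
  unfold pvUpd
  rw [PySem.Dict.items_insert]
  split
  · next h =>
    cases d with
    | nil => simp at h
    | cons a l => simp
  · simp

theorem pvUpd_idem (name : String) (d : List (String × String)) :
    pvUpd name (pvUpd name d) = pvUpd name d := by
  unfold pvUpd
  rw [show (PySem.Dict.mk (((PySem.Dict.mk d).insert (name ++ "_complete") "2").items))
        = (PySem.Dict.mk d).insert (name ++ "_complete") "2" from rfl,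
      PySem.Dict.insert_insert_self]

-- with distinct keys, one pass of A's inner body is a per-entry map
theorem pvStepA_eq_map (r : List (String × List (String × String))) (name : String)
    (hnd : (r.map Prod.fst).Nodup) : pvStepA r name = r.map (pvH name) := by
  unfold pvStepA
  cases hq : (PySem.Dict.mk r).get? name with
  | none =>
    have hnm : name ∉ r.map Prod.fst :=
      (PySem.Dict.get?_eq_none_iff_not_mem_keys (PySem.Dict.mk r) name).mp hq
    rw [List.map_congr_left (g := id) (fun e he => by
          have h1 : e.1 ≠ name := fun h => hnm (h ▸ List.mem_map_of_mem he)
          simp [pvH, h1]),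
        List.map_id]
  | some d =>
    have huniq : ∀ e ∈ r, e.1 = name → e.2 = d := by
      intro e he h1
      have hg : (PySem.Dict.mk r).get? e.1 = some e.2 :=
        PySem.Dict.get?_of_mem_items (PySem.Dict.mk r) (by simpa using he) hnd
      rw [h1, hq] at hg
      exact (Option.some.inj hg).symm
    by_cases hd : d = []
    · show (if d = [] then r else ((PySem.Dict.mk r).insert name (pvUpd name d)).items)
          = List.map (pvH name) r
      rw [if_pos hd,
          List.map_congr_left (g := id) (fun e he => by
            by_cases h1 : e.1 = name
            · have h2 := huniq e he h1; simp [pvH, h1, h2, hd]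
            · simp [pvH, h1]),
          List.map_id]
    · show (if d = [] then r else ((PySem.Dict.mk r).insert name (pvUpd name d)).items)
          = List.map (pvH name) r
      rw [if_neg hd]
      have hc : (PySem.Dict.mk r).contains name = true := by
        rw [PySem.Dict.contains_eq_isSome_get?, hq]; rfl
      rw [PySem.Dict.items_insert_of_contains _ _ hc]
      apply List.map_congr_left
      intro e he
      by_cases h1 : e.1 = name
      · have h2 := huniq e he h1
        simp [pvH, h1, h2, hd]
      · simp [pvH, h1]

theorem pvH_fst (name : String) (e : String × List (String × String)) : (pvH name e).1 = e.1 := by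
  unfold pvH; split <;> rfl

-- A's whole inner loop over the record is the per-entry fold of pvH
theorem pvFoldA_eq_map (names : List String) (r : List (String × List (String × String)))
    (hnd : (r.map Prod.fst).Nodup) :
    names.foldl pvStepA r = r.map (fun e => names.foldl (fun e n => pvH n e) e) := by
  induction names generalizing r with
  | nil => simp
  | cons n ns ih =>
      rw [List.foldl_cons, pvStepA_eq_map r n hnd,
          ih _ (by simpa [List.map_map, Function.comp_def, pvH_fst] using hnd),
          List.map_map]
      rfl

-- the per-entry fold collapses to a single conditional update
theorem pvFoldH_eq (names : List String) (e : String × List (String × String)) :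
    names.foldl (fun e n => pvH n e) e =
      if names.contains e.1 ∧ e.2 ≠ [] then (e.1, pvUpd e.1 e.2) else e := by
  induction names generalizing e with
  | nil => simp
  | cons n ns ih =>
      rw [List.foldl_cons]
      by_cases h : e.1 = n ∧ e.2 ≠ []
      · rw [show pvH n e = (e.1, pvUpd e.1 e.2) from by simp [pvH, h], ih]
        simp [pvUpd_ne_nil, pvUpd_idem, h.1, h.2]
      · rw [show pvH n e = e from by simp only [pvH, if_neg h], ih]
        by_cases h2 : e.2 = []
        · simp [h2]
        · have h1 : e.1 ≠ n := fun h1 => h ⟨h1, h2⟩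
          simp [h1, h2]

-- ===== VERDICT (by name: the statement is the Claim_ definition above) =====
theorem derive_form_completed_spec : Claim_equal_derive_form_completed := by
  intro config data _hdom hpre
  unfold Spec_derive_form_completed derive_form_completed derive_form_completed_alt
  obtain ⟨-, -, hnd⟩ := hpre
  apply List.map_congr_left
  intro record hrec
  rw [pvFoldA_eq_map _ _ (hnd record hrec)]
  apply List.map_congr_left
  intro e _
  rw [pvFoldH_eq]
  refine if_congr ?_ rfl rfl
  simp [PySem.Set.mem_ofList]
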